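-- pv_equiv track=rewrite | github.com/aburke/dragonstone | epi2/primative_types_4_11.py | get_line_intersect
-- ===== SOURCE A (Python) =====
-- from collections import namedtuple
--
-- Line = namedtuple('Line', ['point', 'distance'])
--
-- def get_line_intersect(line1, line2):
--     line = None
--
--     line1, line2 = sorted(line1), sorted(line2)
--     scenario1 = line1[0] <= line2[0] and line1[1] >= line2[0]
--     scenario2 = line2[0] <= line1[0] and line2[1] >= line1[0]
--
--     endpoints = [line1[1], line2[1]]
--
--     if scenario1:
--         line = Line(line2[0], min(x for x in endpoints if x >= line2[0]) - line2[0])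
--     elif scenario2:
--         line = Line(line1[0], min(x for x in endpoints if x >= line1[0]) - line1[0])
--
--     return line
-- ===== SOURCE B (Python) =====
-- from collections import namedtuple
--
-- Line = namedtuple('Line', ['point', 'distance'])
--
-- def get_line_intersect(line1, line2):
--     # Sweep-line over labelled endpoint events: at a tie a start event (0)
--     # sorts before an end event (1), so touching intervals overlap in a point.
--     events = []
--     for lo, hi in (sorted(line1), sorted(line2)):
--         events.append((lo, 0))
--         events.append((hi, 1))
--     events.sort()
--     active = 0
--     start = 0
--     for x, kind in events:
--         if kind == 0:
--             active += 1
--             if active == 2: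
--                 start = x
--         else:
--             if active == 2:
--                 return Line(start, x - start)
--             active -= 1
--     return None
-- ===== Notes on version B (the rewrite author's own statement) =====
-- stated objective: alternative
-- what changed: Replaces A's two scenario branches and filtered-generator min with a sweep-line over sorted labelled endpoint events (start-before-end tie rule), tracking the active-interval count and returning the segment where both intervals are active.
import Mathlib
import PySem

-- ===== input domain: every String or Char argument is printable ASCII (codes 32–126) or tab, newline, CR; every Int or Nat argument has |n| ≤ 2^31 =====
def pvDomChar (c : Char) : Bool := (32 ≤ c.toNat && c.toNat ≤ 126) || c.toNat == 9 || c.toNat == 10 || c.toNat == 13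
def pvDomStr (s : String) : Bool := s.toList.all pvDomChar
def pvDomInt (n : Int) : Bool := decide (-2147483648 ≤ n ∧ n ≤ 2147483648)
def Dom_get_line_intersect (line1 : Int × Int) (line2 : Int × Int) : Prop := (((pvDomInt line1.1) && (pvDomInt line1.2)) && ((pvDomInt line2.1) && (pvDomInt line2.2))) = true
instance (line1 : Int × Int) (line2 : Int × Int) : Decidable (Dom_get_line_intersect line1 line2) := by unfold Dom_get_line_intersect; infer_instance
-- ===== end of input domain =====

-- B replaces A's two scenario branches and filtered-generator min with an endpoint-event
-- sweep (sort labelled endpoints, track the active-interval count); alternative, same cost.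
-- ===== PORT A =====
-- sorted(pair) gives (min, max); the filtered min is PySem.List.min? (never empty under the
-- guard, so the none branch is unreachable; it returns none there to stay total).
def get_line_intersect (line1 : Int × Int) (line2 : Int × Int) : Option (Int × Int) :=
  let l1 : Int × Int := (min line1.1 line1.2, max line1.1 line1.2)
  let l2 : Int × Int := (min line2.1 line2.2, max line2.1 line2.2)
  let scenario1 : Bool := decide (l1.1 ≤ l2.1) && decide (l1.2 ≥ l2.1)
  let scenario2 : Bool := decide (l2.1 ≤ l1.1) && decide (l2.2 ≥ l1.1)
  let endpoints : List Int := [l1.2, l2.2]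
  if scenario1 then
    match PySem.List.min? (endpoints.filter (fun x => decide (x ≥ l2.1))) (fun x => x) with
    | some m => some (l2.1, m - l2.1)
    | none => none
  else if scenario2 then
    match PySem.List.min? (endpoints.filter (fun x => decide (x ≥ l1.1))) (fun x => x) with
    | some m => some (l1.1, m - l1.1)
    | none => none
  else none

-- ===== PORT B =====
-- the sweep loop of Source B: active count, remembered start, early return at an end event
def pvSweep : List (Int × Int) → Int → Int → Option (Int × Int)
  | [], _, _ => none
  | (x, kind) :: rest, active, start =>
    if kind == 0 then
      let active' := active + 1
      pvSweep rest active' (if active' == 2 then x else start)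
    else
      if active == 2 then some (start, x - start)
      else pvSweep rest (active - 1) start

def get_line_intersect_alt (line1 : Int × Int) (line2 : Int × Int) : Option (Int × Int) :=
  let l1 : Int × Int := (min line1.1 line1.2, max line1.1 line1.2)
  let l2 : Int × Int := (min line2.1 line2.2, max line2.1 line2.2)
  let events : List (Int × Int) := [(l1.1, 0), (l1.2, 1), (l2.1, 0), (l2.2, 1)]
  pvSweep (PySem.List.sorted2 events (fun p => p.1) (fun p => p.2)) 0 0

-- ===== PRECONDITION & SPEC =====
def Spec_get_line_intersect (line1 : Int × Int) (line2 : Int × Int) (out : Option (Int × Int)) : Prop := out = get_line_intersect_alt line1 line2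
instance (line1 : Int × Int) (line2 : Int × Int) (out : Option (Int × Int)) : Decidable (Spec_get_line_intersect line1 line2 out) := by unfold Spec_get_line_intersect; infer_instance

-- ===== CLAIM (what is proved, stated in full; the proofs are below) =====
def Claim_equal_get_line_intersect : Prop := ∀ (line1 : Int × Int) (line2 : Int × Int), Dom_get_line_intersect line1 line2 → Spec_get_line_intersect line1 line2 (get_line_intersect line1 line2)

-- ===== LEMMAS AND PROOFS =====

-- ===== VERDICT (by name: the statement is the Claim_ definition above) =====
set_option maxHeartbeats 4000000 in
theorem get_line_intersect_spec : Claim_equal_get_line_intersect := by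
  intro line1 line2 _
  unfold Spec_get_line_intersect get_line_intersect get_line_intersect_alt
  obtain ⟨a1, b1⟩ := line1
  obtain ⟨a2, b2⟩ := line2
  simp only [PySem.List.min?, List.filter, PySem.List.sorted2]
  rcases le_total a1 b1 with h1 | h1 <;> rcases le_total a2 b2 with h2 | h2 <;>
    simp only [min_eq_left h1, max_eq_right h1, min_eq_right h1, max_eq_left h1,
      min_eq_left h2, max_eq_right h2, min_eq_right h2, max_eq_left h2,
      List.foldl, PySem.List.insertBy] <;>
    split_ifs <;> simp_all [PySem.List.insertBy] <;> (try split_ifs) <;>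
    (try simp_all [pvSweep, PySem.List.insertBy]) <;> (try split_ifs) <;>
    (try simp_all [pvSweep]) <;> omega
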